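-- pv_equiv track=rewrite | github.com/sb-b/BOUN-PARS | rule-based-model/rule_based_parser.py | detNounRule
-- ===== SOURCE A (Python) =====
-- def popWord(sent,lemmaList,uposList,xposList,morpList,i):
--
--     sent.pop(i)
--     lemmaList.pop(i)
--     uposList.pop(i)
--     xposList.pop(i)
--     morpList.pop(i)
--
-- def detNounRule(sent, lemmaList, uposList, xposList, morpList, ruleActions):
--
--    i = 0
--    while i < len(sent) - 1:
--
--       if "[Det]" in morpList[i] and "[Noun]" in morpList[i+1]:
--
--          index = int(sent[i].split('#',1)[1])
--
--          ruleActions[index] = "det"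
--          popWord(sent,lemmaList,uposList,xposList,morpList,i)
--          i = 0
--       i = i + 1
--    return ruleActions
-- ===== SOURCE B (Python) =====
-- # Single left-to-right pass over (word, morphology) pairs: after removing a
-- # determiner, back up one position (positions further left were already rejected
-- # and only the pair at j-1 can have changed) instead of restarting the scan.
-- # The five caller lists are left untouched; the result is the updated ruleActions.
-- def detNounRule(sent, lemmaList, uposList, xposList, morpList, ruleActions):
--     pairs = list(zip(sent, morpList))
--     j = 0
--     while j + 1 < len(pairs):
--         word, morp = pairs[j]
--         if "[Det]" in morp and "[Noun]" in pairs[j + 1][1]: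
--             ruleActions[int(word.split('#', 1)[1])] = "det"
--             del pairs[j]
--             j = max(j - 1, 0)
--         else:
--             j += 1
--     return ruleActions
-- ===== Notes on version B (the rewrite author's own statement) =====
-- stated objective: alternative
-- what changed: A restarts the whole determiner-noun scan from the beginning after every removal; B makes a single pass over zipped (word, morphology) pairs, backing up one position after each removal; Pre_ conservatively excludes inputs on which A can raise (parallel lists shorter than the sentence on a match, or a matched determiner word with no integer after '#'), and, on det-run-then-noun inputs, duplicate '#index' annotations and initial ruleActions entries already valued 'det' (there the extra record collapses into an overwrite, an accidental corner).
-- intended difference: On inputs whose morphology list starts with a run of two or more [Det] tags immediately followed (within the sentence) by a [Noun] tag, A never re-checks position 0 after a removal (it restarts at index 1), so it misses the det action for the first word; B backs up to position 0 and records it too, which is the intended 'remove determiners before nouns' behaviour. — e.g. on detNounRule(["a#0", "b#1", "c#2"], ["a", "b", "c"], ["u", "u", "u"], ["x", "x", "x"], ["[Det]", "[Det]", "[Noun]"], []): A returns [(1, "det")], B returns [(1, "det"), (0, "det")]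
-- outside the precondition, e.g. on detNounRule(['a', 'b', 'c'], [], [], [], ['[Det]', 'q', '[Noun]'], {}): A returns {}, B returns {}
import Mathlib
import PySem

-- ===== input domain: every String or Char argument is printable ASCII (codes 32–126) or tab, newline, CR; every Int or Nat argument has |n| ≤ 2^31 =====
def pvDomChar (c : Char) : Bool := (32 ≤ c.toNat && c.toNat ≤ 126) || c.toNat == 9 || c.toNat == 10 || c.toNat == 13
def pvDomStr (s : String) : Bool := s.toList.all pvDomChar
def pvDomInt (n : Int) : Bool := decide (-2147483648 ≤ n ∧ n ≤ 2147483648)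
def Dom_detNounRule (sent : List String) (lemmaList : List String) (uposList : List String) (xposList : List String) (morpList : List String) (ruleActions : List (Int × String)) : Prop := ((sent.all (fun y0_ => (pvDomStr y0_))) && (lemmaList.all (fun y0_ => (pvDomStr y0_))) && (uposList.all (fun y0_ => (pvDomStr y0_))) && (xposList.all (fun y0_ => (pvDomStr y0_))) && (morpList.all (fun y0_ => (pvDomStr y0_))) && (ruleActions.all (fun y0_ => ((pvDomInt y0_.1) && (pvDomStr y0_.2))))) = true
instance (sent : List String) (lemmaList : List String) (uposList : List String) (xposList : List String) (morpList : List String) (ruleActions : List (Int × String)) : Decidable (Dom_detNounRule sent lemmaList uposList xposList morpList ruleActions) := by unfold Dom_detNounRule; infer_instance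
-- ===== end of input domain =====

-- B replaces A's restart-the-scan-after-each-removal with a single pass over zipped
-- (word, morphology) pairs that backs up one position after each removal; on morphology
-- lists starting with ≥2 determiners followed by a noun A misses the first word's det
-- action (it restarts at index 1, never re-checking position 0) while B records it (D_).
-- A also pops matched words out of the five caller lists in place while B leaves them
-- untouched — the equivalence proved is about the returned ruleActions only.

-- ===== PORT A =====
-- "[Det]" in morpList[j] and "[Noun]" in morpList[k]  (both Pythons verbatim)
def pvDN (morp : List String) (j k : Nat) : Bool :=
  PySem.Str.isIn "[Det]" (morp.getD j "") && PySem.Str.isIn "[Noun]" (morp.getD k "")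

-- int(w.split('#', 1)[1])  (shared by both Pythons verbatim; default 0 never reached inside Pre_)
def pvParseIdx (w : String) : Int :=
  ((PySem.Int.ofStr? (((PySem.Str.splitMax? w "#" 1).getD []).getD 1 "")).getD 0)

-- popWord: pops position i from the five parallel lists
def popWord (sent lemmaList uposList xposList morpList : List String) (i : Nat) :
    List String × List String × List String × List String × List String :=
  (sent.eraseIdx i, lemmaList.eraseIdx i, uposList.eraseIdx i, xposList.eraseIdx i, morpList.eraseIdx i)

-- A's while-loop: on a match, record the action, pop the determiner and restart (i = 0, then i += 1)
def detNounRuleLoopA (sent lemmaList uposList xposList morpList : List String)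
    (ra : PySem.Dict Int String) (i : Nat) : PySem.Dict Int String :=
  if h : i + 1 < sent.length then
    if pvDN morpList i (i+1) then
      let p := popWord sent lemmaList uposList xposList morpList i
      detNounRuleLoopA p.1 p.2.1 p.2.2.1 p.2.2.2.1 p.2.2.2.2
        (ra.insert (pvParseIdx (sent.getD i "")) "det") 1
    else
      detNounRuleLoopA sent lemmaList uposList xposList morpList ra (i + 1)
  else ra
termination_by (sent.length, sent.length - i)
decreasing_by
  · simp only [popWord, List.length_eraseIdx, if_pos (Nat.lt_of_succ_lt h)]
    omega
  · omega

def detNounRule (sent : List String) (lemmaList : List String) (uposList : List String) (xposList : List String) (morpList : List String) (ruleActions : List (Int × String)) : List (Int × String) :=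
  (detNounRuleLoopA sent lemmaList uposList xposList morpList (PySem.Dict.ofList ruleActions) 0).items

-- ===== PORT B =====
-- B's while-loop over the zipped pairs: on a match, record, delete, back up one
-- (Python's max(j - 1, 0) is Nat's truncated j - 1)
def detNounRuleLoopB (pairs : List (String × String)) (ra : PySem.Dict Int String) (j : Nat) :
    PySem.Dict Int String :=
  if h : j + 1 < pairs.length then
    if PySem.Str.isIn "[Det]" (pairs.getD j ("", "")).2 && PySem.Str.isIn "[Noun]" (pairs.getD (j+1) ("", "")).2 then
      detNounRuleLoopB (pairs.eraseIdx j) (ra.insert (pvParseIdx (pairs.getD j ("", "")).1) "det") (j - 1)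
    else
      detNounRuleLoopB pairs ra (j + 1)
  else ra
termination_by (pairs.length, pairs.length - j)
decreasing_by
  · simp only [List.length_eraseIdx, if_pos (Nat.lt_of_succ_lt h)]
    omega
  · omega

def detNounRule_alt (sent : List String) (lemmaList : List String) (uposList : List String) (xposList : List String) (morpList : List String) (ruleActions : List (Int × String)) : List (Int × String) :=
  (detNounRuleLoopB (sent.zip morpList) (PySem.Dict.ofList ruleActions) 0).items

-- ===== PRECONDITION & SPEC =====
-- w.split('#', 1)[1] exists and parses as an int
def pvParseOk (w : String) : Bool :=
  ((PySem.Str.splitMax? w "#" 1).getD []).length == 2 &&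
    (PySem.Int.ofStr? (((PySem.Str.splitMax? w "#" 1).getD []).getD 1 "")).isSome

-- Pre_ conservatively excludes inputs on which A can raise: a morphology list shorter than the
-- sentence (IndexError reading morpList[i+1]), a "[Det]" word followed anywhere later by a
-- "[Noun]" word whose surface form has no integer after its first '#' (IndexError/ValueError in
-- int(sent[i].split('#',1)[1])), or such a pattern with one of the other three parallel lists
-- shorter than the sentence (IndexError in popWord); the pattern tests are necessary conditions,
-- so on a few excluded inputs A still returns (see the cited examples, where B agrees with A).
-- On inputs of the D_ shape (a det run then a noun) Pre_ additionally excludes duplicate '#index'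
-- annotations among the first two words and the rest, and initial ruleActions entries already
-- valued "det": there the extra record collapses into an overwrite, an accidental corner.
def Pre_detNounRule (sent : List String) (lemmaList : List String) (uposList : List String) (xposList : List String) (morpList : List String) (ruleActions : List (Int × String)) : Prop :=
  (2 ≤ sent.length → sent.length ≤ morpList.length) ∧
  (∀ j < sent.length, ∀ k < sent.length, j < k → pvDN morpList j k = true →
      pvParseOk (sent.getD j "") = true) ∧
  ((∃ j < sent.length, ∃ k < sent.length, j < k ∧ pvDN morpList j k = true) →
    sent.length ≤ lemmaList.length ∧ sent.length ≤ uposList.length ∧ sent.length ≤ xposList.length) ∧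
  ((∃ j < sent.length, 2 ≤ j ∧
      (∀ k < j, PySem.Str.isIn "[Det]" (morpList.getD k "") = true) ∧
      PySem.Str.isIn "[Noun]" (morpList.getD j "") = true) →
    (∀ s < 2, ∀ t < sent.length, s < t →
      pvParseIdx (sent.getD t "") ≠ pvParseIdx (sent.getD s "")) ∧
    (∀ p ∈ ruleActions, p.2 ≠ "det"))

instance (sent : List String) (lemmaList : List String) (uposList : List String) (xposList : List String) (morpList : List String) (ruleActions : List (Int × String)) : Decidable (Pre_detNounRule sent lemmaList uposList xposList morpList ruleActions) := by
  unfold Pre_detNounRule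
  exact instDecidableAnd (dq := instDecidableAnd (dq := instDecidableAnd))

def pvWitness_detNounRule : List String × List String × List String × List String × List String × (List (Int × String)) :=
  (["the#0", "cat#1"], ["the", "cat"], ["DET", "NOUN"], ["_", "_"], ["[Det]", "[Noun]"], [(5, "x")])

-- On inputs whose morphology list starts with a run of ≥2 "[Det]" tags immediately followed
-- (within the sentence) by a "[Noun]" tag, A returns ruleActions without the det action for the
-- first word (after a removal it restarts the scan at index 1 and never re-checks position 0),
-- while B also records the first determiner, the intended 'remove determiners before nouns' value.
def D_detNounRule (sent : List String) (lemmaList : List String) (uposList : List String) (xposList : List String) (morpList : List String) (ruleActions : List (Int × String)) : Prop :=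
  ∃ j < sent.length, 2 ≤ j ∧
    (∀ k < j, PySem.Str.isIn "[Det]" (morpList.getD k "") = true) ∧
    PySem.Str.isIn "[Noun]" (morpList.getD j "") = true

instance (sent : List String) (lemmaList : List String) (uposList : List String) (xposList : List String) (morpList : List String) (ruleActions : List (Int × String)) : Decidable (D_detNounRule sent lemmaList uposList xposList morpList ruleActions) := by
  unfold D_detNounRule; infer_instance

def Spec_detNounRule (sent : List String) (lemmaList : List String) (uposList : List String) (xposList : List String) (morpList : List String) (ruleActions : List (Int × String)) (out : List (Int × String)) : Prop := ¬ D_detNounRule sent lemmaList uposList xposList morpList ruleActions → out = detNounRule_alt sent lemmaList uposList xposList morpList ruleActions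
instance (sent : List String) (lemmaList : List String) (uposList : List String) (xposList : List String) (morpList : List String) (ruleActions : List (Int × String)) (out : List (Int × String)) : Decidable (Spec_detNounRule sent lemmaList uposList xposList morpList ruleActions out) := by unfold Spec_detNounRule; infer_instance

def pvDiffWitness_detNounRule : List String × List String × List String × List String × List String × (List (Int × String)) :=
  (["a#0", "b#1", "c#2"], ["a", "b", "c"], ["u", "u", "u"], ["x", "x", "x"], ["[Det]", "[Det]", "[Noun]"], [])

def pvDiffWitnessOut_detNounRule : (List (Int × String)) × (List (Int × String)) :=
  ([(1, "det")], [(1, "det"), (0, "det")])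

-- ===== CLAIM (what is proved, stated in full; the proofs are below) =====
def Claim_unchanged_detNounRule : Prop := ∀ (sent : List String) (lemmaList : List String) (uposList : List String) (xposList : List String) (morpList : List String) (ruleActions : List (Int × String)), Dom_detNounRule sent lemmaList uposList xposList morpList ruleActions → Pre_detNounRule sent lemmaList uposList xposList morpList ruleActions → Spec_detNounRule sent lemmaList uposList xposList morpList ruleActions (detNounRule sent lemmaList uposList xposList morpList ruleActions)
def Claim_changed_detNounRule : Prop := Dom_detNounRule (pvDiffWitness_detNounRule.1) (pvDiffWitness_detNounRule.2.1) (pvDiffWitness_detNounRule.2.2.1) (pvDiffWitness_detNounRule.2.2.2.1) (pvDiffWitness_detNounRule.2.2.2.2.1) (pvDiffWitness_detNounRule.2.2.2.2.2) ∧ Pre_detNounRule (pvDiffWitness_detNounRule.1) (pvDiffWitness_detNounRule.2.1) (pvDiffWitness_detNounRule.2.2.1) (pvDiffWitness_detNounRule.2.2.2.1) (pvDiffWitness_detNounRule.2.2.2.2.1) (pvDiffWitness_detNounRule.2.2.2.2.2) ∧ D_detNounRule (pvDiffWitness_detNounRule.1) (pvDiffWitness_detNounRule.2.1) (pvDiffWitness_detNounRule.2.2.1)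 (pvDiffWitness_detNounRule.2.2.2.1) (pvDiffWitness_detNounRule.2.2.2.2.1) (pvDiffWitness_detNounRule.2.2.2.2.2) ∧ detNounRule (pvDiffWitness_detNounRule.1) (pvDiffWitness_detNounRule.2.1) (pvDiffWitness_detNounRule.2.2.1) (pvDiffWitness_detNounRule.2.2.2.1) (pvDiffWitness_detNounRule.2.2.2.2.1) (pvDiffWitness_detNounRule.2.2.2.2.2) = pvDiffWitnessOut_detNounRule.1 ∧ detNounRule_alt (pvDiffWitness_detNounRule.1) (pvDiffWitness_detNounRule.2.1) (pvDiffWitness_detNounRule.2.2.1) (pvDiffWitness_detNounRule.2.2.2.1) (pvDiffWitness_detNounRule.2.2.2.2.1) (pvDiffWitness_detNounRule.2.2.2.2.2) = pvDiffWitnessOut_detNounRule.2 ∧ pvDiffWitnessOut_detNounRule.1 ≠ pvDiffWitnessOut_detNounRule.2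

def Claim_exact_detNounRule : Prop := ∀ (sent : List String) (lemmaList : List String) (uposList : List String) (xposList : List String) (morpList : List String) (ruleActions : List (Int × String)), Dom_detNounRule sent lemmaList uposList xposList morpList ruleActions → Pre_detNounRule sent lemmaList uposList xposList morpList ruleActions → D_detNounRule sent lemmaList uposList xposList morpList ruleActions → detNounRule sent lemmaList uposList xposList morpList ruleActions ≠ detNounRule_alt sent lemmaList uposList xposList morpList ruleActions

-- ===== LEMMAS AND PROOFS =====

theorem pvWitness_ok :
    Dom_detNounRule pvWitness_detNounRule.1 pvWitness_detNounRule.2.1 pvWitness_detNounRule.2.2.1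
      pvWitness_detNounRule.2.2.2.1 pvWitness_detNounRule.2.2.2.2.1 pvWitness_detNounRule.2.2.2.2.2 ∧
    Pre_detNounRule pvWitness_detNounRule.1 pvWitness_detNounRule.2.1 pvWitness_detNounRule.2.2.1
      pvWitness_detNounRule.2.2.2.1 pvWitness_detNounRule.2.2.2.2.1 pvWitness_detNounRule.2.2.2.2.2 := by
  constructor <;> decide

-- the D_ condition only depends on sent and morpList
theorem D_iff (sent lemmaList uposList xposList morpList : List String) (ruleActions : List (Int × String)) (l2 u2 x2 : List String) (r2 : List (Int × String)) :
    D_detNounRule sent lemmaList uposList xposList morpList ruleActions ↔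
      D_detNounRule sent l2 u2 x2 morpList r2 := Iff.rfl

-- erasing index j from two parallel lists commutes with zip (j below both lengths)
theorem zip_eraseIdx {α β : Type} (xs : List α) (ys : List β) (j : Nat)
    (hx : j < xs.length) (hy : j < ys.length) :
    (xs.eraseIdx j).zip (ys.eraseIdx j) = (xs.zip ys).eraseIdx j := by
  induction j generalizing xs ys with
  | zero =>
    cases xs with
    | nil => simp at hx
    | cons x xs' =>
      cases ys with
      | nil => simp at hy
      | cons y ys' => simp [List.eraseIdx]
  | succ j ih =>
    cases xs with
    | nil => simp at hx
    | cons x xs' =>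
      cases ys with
      | nil => simp at hy
      | cons y ys' =>
        simp only [List.length_cons] at hx hy
        simp [List.eraseIdx, ih xs' ys' (by omega) (by omega)]

-- getD left of an erased index is unchanged
theorem getD_eraseIdx_of_lt {α : Type} (xs : List α) (i u : Nat) (h : u < i) (d : α) :
    (xs.eraseIdx i).getD u d = xs.getD u d := by
  simp [List.getD_eq_getElem?_getD, List.getElem?_eraseIdx_of_lt h]

-- getD at or right of an erased index shifts by one
theorem getD_eraseIdx_of_ge {α : Type} (xs : List α) (i u : Nat) (h : i ≤ u) (d : α) :
    (xs.eraseIdx i).getD u d = xs.getD (u + 1) d := by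
  simp [List.getD_eq_getElem?_getD, List.getElem?_eraseIdx_of_ge h]

-- the match test only reads positions u and u+1, both left of an erased index i
theorem pvDN_eraseIdx (morp : List String) (i u : Nat) (h : u + 1 < i) :
    pvDN (morp.eraseIdx i) u (u + 1) = pvDN morp u (u + 1) := by
  unfold pvDN
  rw [getD_eraseIdx_of_lt _ i u (by omega), getD_eraseIdx_of_lt _ i (u + 1) h]

-- getD of a zip of parallel lists, componentwise
theorem zip_getD {α β : Type} (xs : List α) (ys : List β) (t : Nat) (d1 : α) (d2 : β)
    (ht : t < xs.length) (hlen : xs.length ≤ ys.length) :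
    (xs.zip ys).getD t (d1, d2) = (xs.getD t d1, ys.getD t d2) := by
  have hz : t < (xs.zip ys).length := by rw [List.length_zip]; omega
  rw [List.getD_eq_getElem _ _ hz, List.getElem_zip,
    List.getD_eq_getElem _ _ ht, List.getD_eq_getElem _ _ (by omega)]

-- erasing a determiner preserves the absence of a det-run-then-noun prefix (contrapositive)
theorem D_of_erase (sent morp : List String) (l u x : List String) (r : List (Int × String)) (i : Nat)
    (hi : i < sent.length)
    (hdet : PySem.Str.isIn "[Det]" (morp.getD i "") = true)
    (hD : D_detNounRule (sent.eraseIdx i) l u x (morp.eraseIdx i) r) :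
    D_detNounRule sent l u x morp r := by
  obtain ⟨j, hj, hj2, hdets, hnoun⟩ := hD
  rw [List.length_eraseIdx_of_lt hi] at hj
  by_cases hcase : j < i
  · refine ⟨j, by omega, hj2, ?_, ?_⟩
    · intro k hk
      have := hdets k hk
      rwa [getD_eraseIdx_of_lt _ i k (by omega)] at this
    · rwa [getD_eraseIdx_of_lt _ i j (by omega)] at hnoun
  · refine ⟨j + 1, by omega, by omega, ?_, ?_⟩
    · intro k hk
      by_cases hk2 : k < i
      · have := hdets k (by omega)
        rwa [getD_eraseIdx_of_lt _ i k hk2] at this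
      · by_cases hk3 : k = i
        · rwa [hk3]
        · have := hdets (k - 1) (by omega)
          rwa [getD_eraseIdx_of_ge _ i (k - 1) (by omega), Nat.sub_add_cancel (by omega)] at this
    · rwa [getD_eraseIdx_of_ge _ i j (by omega)] at hnoun

-- under ¬D_, a removal at index 0 or 1 cannot create a match at position 0
theorem noMatch0_after_erase (sent morp : List String) (l u x : List String) (r : List (Int × String)) (i : Nat)
    (hi : i ≤ 1) (hlen : 2 < sent.length)
    (hmatch : pvDN morp i (i+1) = true)
    (hD : ¬ D_detNounRule sent l u x morp r) :
    pvDN (morp.eraseIdx i) 0 1 = false := by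
  by_contra hcon
  rw [Bool.not_eq_false] at hcon
  unfold pvDN at hmatch hcon
  rw [Bool.and_eq_true] at hmatch hcon
  obtain ⟨hm1, hm2⟩ := hmatch
  obtain ⟨hc1, hc2⟩ := hcon
  apply hD
  refine ⟨2, by omega, by omega, ?_, ?_⟩
  · intro k hk
    interval_cases i
    · -- erased 0: new pair (0,1) = old (1,2); match at 0 gives Det(m0), new gives Det(m1)
      interval_cases k
      · exact hm1
      · rwa [getD_eraseIdx_of_ge _ 0 0 (by omega)] at hc1
    · -- erased 1: new pair (0,1) = (old 0, old 2); match at 1 gives Det(m1)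
      interval_cases k
      · rwa [getD_eraseIdx_of_lt _ 1 0 (by omega)] at hc1
      · exact hm1
  · interval_cases i
    · rwa [getD_eraseIdx_of_ge _ 0 1 (by omega)] at hc2
    · rwa [getD_eraseIdx_of_ge _ 1 1 (by omega)] at hc2

-- A's scan from t reaches j unchanged when no pair with left index in [t, j) matches
theorem loopA_skip (sent lemmaList uposList xposList morpList : List String)
    (ra : PySem.Dict Int String) (t j : Nat) (hle : t ≤ j)
    (hnm : ∀ u, t ≤ u → u < j → u + 1 < sent.length → pvDN morpList u (u+1) = false) :
    detNounRuleLoopA sent lemmaList uposList xposList morpList ra t =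
      detNounRuleLoopA sent lemmaList uposList xposList morpList ra j := by
  obtain ⟨d, hgen⟩ : ∃ d, j - t = d := ⟨_, rfl⟩
  induction d generalizing t with
  | zero =>
    have : t = j := by omega
    subst this; rfl
  | succ d ih =>
    have htj : t < j := by omega
    rw [detNounRuleLoopA]
    by_cases hg : t + 1 < sent.length
    · rw [dif_pos hg, if_neg (by simp [hnm t le_rfl htj hg])]
      exact ih (t + 1) (by omega) (fun u h1 h2 h3 => hnm u (by omega) h2 h3) (by omega)
    · rw [dif_neg hg, detNounRuleLoopA, dif_neg (by omega)]

-- B's step from 0: the pair (0,1) check fails (or the list is too short), so B moves to 1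
theorem loopB_zero_step (pairs : List (String × String)) (ra : PySem.Dict Int String)
    (h : 1 < pairs.length → (PySem.Str.isIn "[Det]" (pairs.getD 0 ("", "")).2 &&
        PySem.Str.isIn "[Noun]" (pairs.getD 1 ("", "")).2) = false) :
    detNounRuleLoopB pairs ra 0 = detNounRuleLoopB pairs ra 1 := by
  rw [detNounRuleLoopB]
  by_cases hg : 0 + 1 < pairs.length
  · have hc := h (by omega)
    rw [dif_pos hg, if_neg (by simp only [hc, Bool.false_eq_true, not_false_eq_true])]
  · rw [dif_neg hg]
    rw [detNounRuleLoopB, dif_neg (by omega)]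

-- the simulation: A from j equals B from j when positions [1, j) are known non-matching
-- and the current state has no det-run-then-noun prefix
theorem loopA_eq_loopB (sent lemmaList uposList xposList morpList : List String)
    (ra : PySem.Dict Int String) (j : Nat) (hlen : sent.length ≤ morpList.length)
    (hD : ¬ D_detNounRule sent lemmaList uposList xposList morpList [])
    (hnm : ∀ u, 1 ≤ u → u < j → u + 1 < sent.length → pvDN morpList u (u+1) = false) :
    detNounRuleLoopA sent lemmaList uposList xposList morpList ra j =
      detNounRuleLoopB (sent.zip morpList) ra j := by
  obtain ⟨n, hb⟩ : ∃ n, sent.length + (sent.length - j) ≤ n := ⟨_, le_rfl⟩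
  induction n generalizing sent lemmaList uposList xposList morpList ra j with
  | zero =>
    have h0 : sent.length = 0 := by omega
    rw [detNounRuleLoopA, detNounRuleLoopB, dif_neg (by omega),
      dif_neg (by rw [List.length_zip]; omega)]
  | succ n ih =>
    have hzlen : (sent.zip morpList).length = sent.length := by
      rw [List.length_zip]; omega
    rw [detNounRuleLoopA, detNounRuleLoopB]
    by_cases hg : j + 1 < sent.length
    · have hcond : (PySem.Str.isIn "[Det]" ((sent.zip morpList).getD j ("", "")).2 &&
          PySem.Str.isIn "[Noun]" ((sent.zip morpList).getD (j+1) ("", "")).2) = pvDN morpList j (j+1) := by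
        rw [zip_getD sent morpList j "" "" (by omega) hlen,
          zip_getD sent morpList (j+1) "" "" (by omega) hlen]
        simp [pvDN]
      rw [dif_pos hg, dif_pos (by omega), hcond]
      by_cases hc : pvDN morpList j (j+1) = true
      · rw [if_pos hc, if_pos hc]
        simp only [popWord]
        have hkey : ((sent.zip morpList).getD j ("", "")).1 = sent.getD j "" := by
          rw [zip_getD sent morpList j "" "" (by omega) hlen]
        rw [hkey, ← zip_eraseIdx sent morpList j (by omega) (by omega)]
        have hdet : PySem.Str.isIn "[Det]" (morpList.getD j "") = true := by
          have := hc
          unfold pvDN at this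
          exact (Bool.and_eq_true _ _ |>.mp this).1
        have hD' : ¬ D_detNounRule (sent.eraseIdx j) lemmaList uposList xposList (morpList.eraseIdx j) [] :=
          fun hx => hD (D_of_erase sent morpList lemmaList uposList xposList [] j (by omega) hdet hx)
        have hlen' : (sent.eraseIdx j).length ≤ (morpList.eraseIdx j).length := by
          rw [List.length_eraseIdx_of_lt (by omega), List.length_eraseIdx_of_lt (by omega)]
          omega
        have hslen : (sent.eraseIdx j).length = sent.length - 1 :=
          List.length_eraseIdx_of_lt (by omega)
        by_cases hj2 : 2 ≤ j
        · -- removal deep in the list: A restarts at 1 and skips to j - 1, where B resumes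
          have hnm' : ∀ u, 1 ≤ u → u < j - 1 → u + 1 < (sent.eraseIdx j).length →
              pvDN (morpList.eraseIdx j) u (u + 1) = false := by
            intro u h1 h2 h3
            rw [pvDN_eraseIdx morpList j u (by omega)]
            exact hnm u h1 (by omega) (by omega)
          rw [loopA_skip _ _ _ _ _ _ 1 (j - 1) (by omega) (fun u h1 h2 h3 => hnm' u h1 h2 h3)]
          exact ih (sent.eraseIdx j) (lemmaList.eraseIdx j) (uposList.eraseIdx j)
            (xposList.eraseIdx j) (morpList.eraseIdx j) _ (j - 1) hlen' hD' hnm' (by omega)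
        · -- removal at position 0 or 1: B backs up to 0, finds no match there, and moves to 1
          have hj10 : j - 1 = 0 := by omega
          rw [hj10]
          rw [loopB_zero_step ((sent.eraseIdx j).zip (morpList.eraseIdx j)) _ (by
            intro h1
            have hzl : ((sent.eraseIdx j).zip (morpList.eraseIdx j)).length =
                (sent.eraseIdx j).length := by rw [List.length_zip]; omega
            rw [zip_getD _ _ 0 "" "" (by omega) hlen',
              zip_getD _ _ 1 "" "" (by omega) hlen']
            have := noMatch0_after_erase sent morpList lemmaList uposList xposList [] j
              (by omega) (by omega) hc hD
            unfold pvDN at this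
            simpa using this)]
          exact ih (sent.eraseIdx j) (lemmaList.eraseIdx j) (uposList.eraseIdx j)
            (xposList.eraseIdx j) (morpList.eraseIdx j) _ 1 hlen' hD'
            (fun u h1 h2 h3 => by omega) (by omega)
      · rw [if_neg hc, if_neg hc]
        exact ih sent lemmaList uposList xposList morpList ra (j + 1) hlen hD
          (fun u h1 h2 h3 => by
            rcases Nat.lt_or_ge u j with hu | hu
            · exact hnm u h1 hu h3
            · have : u = j := by omega
              subst this
              exact eq_false_of_ne_true hc)
          (by omega)
    · rw [dif_neg hg, dif_neg (by omega)]

-- ---- tightness machinery: inside D_ the two ports provably disagree ----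

-- the det-run-then-noun prefix condition (the body of D_, on sent/morp only)
def DC (sent morp : List String) : Prop :=
  ∃ j, j < sent.length ∧ 2 ≤ j ∧
    (∀ k < j, PySem.Str.isIn "[Det]" (morp.getD k "") = true) ∧
    PySem.Str.isIn "[Noun]" (morp.getD j "") = true

-- the zipped pair test equals pvDN on parallel lists
theorem zip_cond (sent morp : List String) (hlen : sent.length ≤ morp.length) (j : Nat)
    (hj : j + 1 < sent.length) :
    (PySem.Str.isIn "[Det]" ((sent.zip morp).getD j ("", "")).2 &&
      PySem.Str.isIn "[Noun]" ((sent.zip morp).getD (j+1) ("", "")).2) = pvDN morp j (j+1) := by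
  rw [zip_getD sent morp j "" "" (by omega) hlen,
    zip_getD sent morp (j+1) "" "" (by omega) hlen]
  simp [pvDN]

-- a value looked up in a dict built by inserting pairs comes from the seed or the pairs
theorem values_foldl_insert (l : List (Int × String)) (d : PySem.Dict Int String) (w : String)
    (h : w ∈ (l.foldl (fun d p => d.insert p.1 p.2) d).values) :
    w ∈ d.values ∨ ∃ p ∈ l, p.2 = w := by
  induction l generalizing d with
  | nil => exact Or.inl h
  | cons p l ih =>
    rcases ih (d.insert p.1 p.2) h with hm | ⟨q, hq1, hq2⟩
    · rcases PySem.Dict.mem_values_insert d p.1 p.2 w hm with he | hm'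
      · exact Or.inr ⟨p, List.mem_cons_self, he.symm⟩
      · exact Or.inl hm'
    · exact Or.inr ⟨q, List.mem_cons_of_mem _ hq1, hq2⟩

-- a dict built from pairs none of which is valued "det" never answers "det"
theorem get?_ofList_ne_det (ra : List (Int × String)) (hdet : ∀ p ∈ ra, p.2 ≠ "det") (k : Int) :
    (PySem.Dict.ofList ra).get? k ≠ some "det" := by
  intro h
  have hv : ("det" : String) ∈ (PySem.Dict.ofList ra).values := by
    have h2 := PySem.Dict.mem_items_of_get?_eq_some (PySem.Dict.ofList ra) h
    simp only [PySem.Dict.values]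
    exact List.mem_map.mpr ⟨(k, "det"), h2, rfl⟩
  rcases values_foldl_insert ra PySem.Dict.empty "det" hv with hm | ⟨p, hp1, hp2⟩
  · simp [PySem.Dict.empty, PySem.Dict.values] at hm
  · exact hdet p hp1 hp2

-- A's scan from i ≥ 1 only ever records keys of words at positions ≥ 1
theorem keysA (sent lemmaList uposList xposList morpList : List String)
    (ra : PySem.Dict Int String) (i : Nat) (k : Int) (hi : 1 ≤ i)
    (hp : ∀ t, 1 ≤ t → t < sent.length → pvParseIdx (sent.getD t "") ≠ k) :
    (detNounRuleLoopA sent lemmaList uposList xposList morpList ra i).get? k = ra.get? k := by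
  obtain ⟨L, hL⟩ : ∃ L, sent.length ≤ L := ⟨_, le_rfl⟩
  induction L generalizing sent lemmaList uposList xposList morpList ra i with
  | zero => rw [detNounRuleLoopA, dif_neg (by omega)]
  | succ L ihL =>
    obtain ⟨m, hm⟩ : ∃ m, sent.length - i ≤ m := ⟨_, le_rfl⟩
    induction m generalizing ra i with
    | zero => rw [detNounRuleLoopA, dif_neg (by omega)]
    | succ m ihm =>
      rw [detNounRuleLoopA]
      by_cases hg : i + 1 < sent.length
      · rw [dif_pos hg]
        by_cases hc : pvDN morpList i (i+1) = true
        · rw [if_pos hc]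
          simp only [popWord]
          have hp' : ∀ t, 1 ≤ t → t < (sent.eraseIdx i).length →
              pvParseIdx ((sent.eraseIdx i).getD t "") ≠ k := by
            intro t h1 h2
            rw [List.length_eraseIdx_of_lt (by omega)] at h2
            by_cases ht : t < i
            · rw [getD_eraseIdx_of_lt _ i t ht]; exact hp t h1 (by omega)
            · rw [getD_eraseIdx_of_ge _ i t (by omega)]; exact hp (t+1) (by omega) (by omega)
          rw [ihL (sent.eraseIdx i) (lemmaList.eraseIdx i) (uposList.eraseIdx i)
            (xposList.eraseIdx i) (morpList.eraseIdx i) _ 1 le_rfl hp'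
            (by rw [List.length_eraseIdx_of_lt (by omega)]; omega)]
          exact PySem.Dict.get?_insert_of_ne ra "det" (Ne.symm (hp i hi (by omega)))
        · rw [if_neg hc]
          exact ihm ra (i+1) (by omega) (by omega)
      · rw [dif_neg hg]

-- with everything left of j non-matching, the chain witness lies at or beyond j
theorem DC_lt (sent morp : List String) (j : Nat)
    (hnm : ∀ u, u < j → u + 1 < sent.length → pvDN morp u (u+1) = false)
    (hc : DC sent morp) :
    ∃ jj, j < jj ∧ jj < sent.length ∧ 2 ≤ jj ∧
      (∀ k < jj, PySem.Str.isIn "[Det]" (morp.getD k "") = true) ∧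
      PySem.Str.isIn "[Noun]" (morp.getD jj "") = true := by
  obtain ⟨jj, hjjlen, hjj2, hpre, hnoun⟩ := hc
  have hm : pvDN morp (jj-1) (jj-1+1) = true := by
    unfold pvDN
    rw [show jj-1+1 = jj from by omega, hpre (jj-1) (by omega), hnoun]
    rfl
  have hge : ¬ (jj - 1 < j) := by
    intro hlt
    rw [hnm (jj-1) hlt (by omega)] at hm
    exact absurd hm (by simp)
  exact ⟨jj, by omega, hjjlen, hjj2, hpre, hnoun⟩

-- erasing a matched determiner at j ≥ 1 keeps the chain, or exposes a match at position 0
theorem DC_step (sent morp : List String) (j : Nat) (h1 : 1 ≤ j)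
    (hm : pvDN morp j (j+1) = true) (hg : j + 1 < sent.length)
    (hc : DC sent morp)
    (hnm : ∀ u, u < j → u + 1 < sent.length → pvDN morp u (u+1) = false) :
    DC (sent.eraseIdx j) (morp.eraseIdx j) ∨
      (j = 1 ∧ 1 < (sent.eraseIdx j).length ∧ pvDN (morp.eraseIdx j) 0 1 = true) := by
  obtain ⟨jj, hjlt, hjjlen, hjj2, hpre, hnoun⟩ := DC_lt sent morp j hnm hc
  have hslen : (sent.eraseIdx j).length = sent.length - 1 :=
    List.length_eraseIdx_of_lt (by omega)
  by_cases hcase : j + 1 < jj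
  · left
    refine ⟨jj - 1, by omega, by omega, ?_, ?_⟩
    · intro k hk
      by_cases hk2 : k < j
      · rw [getD_eraseIdx_of_lt _ j k hk2]; exact hpre k (by omega)
      · rw [getD_eraseIdx_of_ge _ j k (by omega)]; exact hpre (k+1) (by omega)
    · rw [getD_eraseIdx_of_ge _ j (jj-1) (by omega), show jj-1+1 = jj from by omega]
      exact hnoun
  · have hjjeq : jj = j + 1 := by omega
    by_cases hj2 : 2 ≤ j
    · left
      refine ⟨j, by omega, hj2, ?_, ?_⟩
      · intro k hk
        rw [getD_eraseIdx_of_lt _ j k hk]; exact hpre k (by omega)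
      · rw [getD_eraseIdx_of_ge _ j j le_rfl, show j+1 = jj from hjjeq.symm]
        exact hnoun
    · right
      have hj1 : j = 1 := by omega
      subst hj1
      refine ⟨rfl, by omega, ?_⟩
      unfold pvDN
      rw [getD_eraseIdx_of_lt _ 1 0 (by omega), getD_eraseIdx_of_ge _ 1 1 le_rfl,
        hpre 0 (by omega), show (1:Nat)+1 = jj from by omega, hnoun]
      rfl

-- erasing a matched determiner at 0 keeps the chain, or exposes a match at position 0
theorem DC_step0 (sent morp : List String)
    (hc : DC sent morp) :
    DC (sent.eraseIdx 0) (morp.eraseIdx 0) ∨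
      (1 < (sent.eraseIdx 0).length ∧ pvDN (morp.eraseIdx 0) 0 1 = true) := by
  obtain ⟨jj, hjjlen, hjj2, hpre, hnoun⟩ := hc
  have hslen : (sent.eraseIdx 0).length = sent.length - 1 :=
    List.length_eraseIdx_of_lt (by omega)
  by_cases hcase : 3 ≤ jj
  · left
    refine ⟨jj - 1, by omega, by omega, ?_, ?_⟩
    · intro k hk
      rw [getD_eraseIdx_of_ge _ 0 k (by omega)]; exact hpre (k+1) (by omega)
    · rw [getD_eraseIdx_of_ge _ 0 (jj-1) (by omega), show jj-1+1 = jj from by omega]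
      exact hnoun
  · right
    refine ⟨by omega, ?_⟩
    unfold pvDN
    rw [getD_eraseIdx_of_ge _ 0 0 le_rfl, getD_eraseIdx_of_ge _ 0 1 (by omega),
      hpre 1 (by omega), show (1:Nat)+1 = jj from by omega, hnoun]
    rfl

-- B's scan records "det" under the protected key: either it is already recorded, or the
-- protected key is the current first word's, everything to its right is key-distinct,
-- nothing left of j matches, and a chain (or an immediate match at 0) lies ahead
theorem keyB (sent morp : List String) (ra : PySem.Dict Int String) (j : Nat) (k : Int)
    (hlen : sent.length ≤ morp.length)
    (h : ra.get? k = some "det" ∨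
      (k = pvParseIdx (sent.getD 0 "") ∧
       (∀ t, 1 ≤ t → t < sent.length → pvParseIdx (sent.getD t "") ≠ k) ∧
       (∀ u, u < j → u + 1 < sent.length → pvDN morp u (u+1) = false) ∧
       (DC sent morp ∨ (j = 0 ∧ 1 < sent.length ∧ pvDN morp 0 1 = true)))) :
    (detNounRuleLoopB (sent.zip morp) ra j).get? k = some "det" := by
  obtain ⟨n, hb⟩ : ∃ n, sent.length + (sent.length - j) ≤ n := ⟨_, le_rfl⟩
  induction n generalizing sent morp ra j with
  | zero =>
    rcases h with ha | ⟨_, _, _, hdc | ⟨_, hl, _⟩⟩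
    · rw [detNounRuleLoopB, dif_neg (by rw [List.length_zip]; omega)]; exact ha
    · obtain ⟨jj, h1, h2, _, _⟩ := hdc; omega
    · omega
  | succ n ih =>
    have hzlen : (sent.zip morp).length = sent.length := by rw [List.length_zip]; omega
    rw [detNounRuleLoopB]
    rcases h with ha | ⟨hk, hp, hnm, hdc⟩
    · by_cases hg : j + 1 < (sent.zip morp).length
      · rw [dif_pos hg]
        by_cases hcnd : (PySem.Str.isIn "[Det]" ((sent.zip morp).getD j ("", "")).2 &&
            PySem.Str.isIn "[Noun]" ((sent.zip morp).getD (j+1) ("", "")).2) = true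
        · rw [if_pos hcnd]
          have hins : (ra.insert (pvParseIdx ((sent.zip morp).getD j ("", "")).1) "det").get? k
              = some "det" := by
            by_cases hkk : k = pvParseIdx ((sent.zip morp).getD j ("", "")).1
            · rw [hkk]; exact PySem.Dict.get?_insert_self ra _ "det"
            · rw [PySem.Dict.get?_insert_of_ne ra "det" hkk]; exact ha
          rw [← zip_eraseIdx sent morp j (by omega) (by omega)]
          exact ih (sent.eraseIdx j) (morp.eraseIdx j) _ (j-1)
            (by rw [List.length_eraseIdx_of_lt (by omega),
                List.length_eraseIdx_of_lt (by omega)]; omega)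
            (Or.inl hins)
            (by rw [List.length_eraseIdx_of_lt (by omega)]; omega)
        · rw [if_neg hcnd]
          exact ih sent morp ra (j+1) hlen (Or.inl ha) (by omega)
      · rw [dif_neg hg]; exact ha
    · have hjlt : j + 1 < sent.length := by
        rcases hdc with hdcc | ⟨hj0, hl2, _⟩
        · obtain ⟨jj, hlt, hjjlen, _, _, _⟩ := DC_lt sent morp j hnm hdcc; omega
        · omega
      rw [dif_pos (by omega), zip_cond sent morp hlen j hjlt]
      by_cases hcnd : pvDN morp j (j+1) = true
      · rw [if_pos hcnd]
        have hkey : ((sent.zip morp).getD j ("", "")).1 = sent.getD j "" := by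
          rw [zip_getD sent morp j "" "" (by omega) hlen]
        rw [hkey, ← zip_eraseIdx sent morp j (by omega) (by omega)]
        have hlen' : (sent.eraseIdx j).length ≤ (morp.eraseIdx j).length := by
          rw [List.length_eraseIdx_of_lt (by omega), List.length_eraseIdx_of_lt (by omega)]
          omega
        have hmeas : (sent.eraseIdx j).length + ((sent.eraseIdx j).length - (j-1)) ≤ n := by
          rw [List.length_eraseIdx_of_lt (by omega)]; omega
        by_cases hj0 : j = 0
        · subst hj0
          have hins : (ra.insert (pvParseIdx (sent.getD 0 "")) "det").get? k = some "det" := by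
            rw [hk]; exact PySem.Dict.get?_insert_self ra _ "det"
          exact ih (sent.eraseIdx 0) (morp.eraseIdx 0) _ (0-1) hlen' (Or.inl hins) hmeas
        · have hj1 : 1 ≤ j := by omega
          have hdcc : DC sent morp := by
            rcases hdc with h' | ⟨h0, _, _⟩
            · exact h'
            · omega
          have hstep := DC_step sent morp j hj1 hcnd hjlt hdcc hnm
          apply ih (sent.eraseIdx j) (morp.eraseIdx j) _ (j-1) hlen' (Or.inr ?_) hmeas
          refine ⟨?_, ?_, ?_, ?_⟩
          · rw [getD_eraseIdx_of_lt _ j 0 (by omega)]; exact hk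
          · intro t h1 h2
            rw [List.length_eraseIdx_of_lt (by omega)] at h2
            by_cases ht : t < j
            · rw [getD_eraseIdx_of_lt _ j t ht]; exact hp t h1 (by omega)
            · rw [getD_eraseIdx_of_ge _ j t (by omega)]; exact hp (t+1) (by omega) (by omega)
          · intro u hu h2
            rw [List.length_eraseIdx_of_lt (by omega)] at h2
            rw [pvDN_eraseIdx morp j u (by omega)]
            exact hnm u (by omega) (by omega)
          · rcases hstep with hl | ⟨hj1', hl', hm'⟩
            · exact Or.inl hl
            · exact Or.inr ⟨by omega, hl', hm'⟩
      · rw [if_neg hcnd]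
        have hdcc : DC sent morp := by
          rcases hdc with h' | ⟨h0, hl2, hm⟩
          · exact h'
          · subst h0; exact absurd hm hcnd
        apply ih sent morp ra (j+1) hlen (Or.inr ?_) (by omega)
        refine ⟨hk, hp, ?_, Or.inl hdcc⟩
        intro u hu h2
        by_cases huj : u < j
        · exact hnm u huj h2
        · have : u = j := by omega
          subst this
          exact eq_false_of_ne_true hcnd

-- ===== VERDICT (by name: the statement is the Claim_ definition above) =====
theorem detNounRule_spec : Claim_unchanged_detNounRule := by
  intro sent lemmaList uposList xposList morpList ruleActions _hDom hPre
  unfold Spec_detNounRule detNounRule detNounRule_alt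
  intro hD
  by_cases hlen : sent.length ≤ morpList.length
  · rw [loopA_eq_loopB sent lemmaList uposList xposList morpList _ 0 hlen
      (fun hx => hD ((D_iff sent lemmaList uposList xposList morpList ruleActions lemmaList uposList xposList []).mpr hx)) (by omega)]
  · have h1 : sent.length ≤ 1 := by
      by_contra h
      exact hlen (hPre.1 (by omega))
    rw [detNounRuleLoopA, detNounRuleLoopB]
    have hz : (sent.zip morpList).length = min sent.length morpList.length := List.length_zip
    rw [dif_neg (by omega), dif_neg (by omega)]

theorem detNounRule_tight : Claim_exact_detNounRule := by
  intro sent lemmaList uposList xposList morpList ruleActions _hDom hPre hD heq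
  obtain ⟨jj, hjjlen, hjj2, hpreD, hnoun⟩ := hD
  have hlen : sent.length ≤ morpList.length := hPre.1 (by omega)
  obtain ⟨hdist, hdet⟩ := hPre.2.2.2 ⟨jj, hjjlen, hjj2, hpreD, hnoun⟩
  have hdcc : DC sent morpList := ⟨jj, hjjlen, hjj2, hpreD, hnoun⟩
  have hnod : ∀ k : Int, (PySem.Dict.ofList ruleActions).get? k ≠ some "det" :=
    get?_ofList_ne_det ruleActions hdet
  unfold detNounRule detNounRule_alt at heq
  have heqd := PySem.Dict.ext heq
  by_cases himm : pvDN morpList 0 1 = true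
  · -- the pair (0,1) matches at once: A freezes the new first word, B does not; key of word 1
    have hk10 : pvParseIdx (sent.getD 1 "") ≠ pvParseIdx (sent.getD 0 "") :=
      hdist 0 (by omega) 1 (by omega) (by omega)
    have hA : (detNounRuleLoopA sent lemmaList uposList xposList morpList
        (PySem.Dict.ofList ruleActions) 0).get? (pvParseIdx (sent.getD 1 "")) =
        (PySem.Dict.ofList ruleActions).get? (pvParseIdx (sent.getD 1 "")) := by
      rw [detNounRuleLoopA, dif_pos (by omega), if_pos himm]
      simp only [popWord]
      rw [keysA (sent.eraseIdx 0) (lemmaList.eraseIdx 0) (uposList.eraseIdx 0)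
        (xposList.eraseIdx 0) (morpList.eraseIdx 0) _ 1 _ le_rfl (by
          intro t h1 h2
          rw [List.length_eraseIdx_of_lt (by omega)] at h2
          rw [getD_eraseIdx_of_ge _ 0 t (by omega)]
          exact hdist 1 (by omega) (t+1) (by omega) (by omega))]
      exact PySem.Dict.get?_insert_of_ne _ "det" hk10
    have hB : (detNounRuleLoopB (sent.zip morpList)
        (PySem.Dict.ofList ruleActions) 0).get? (pvParseIdx (sent.getD 1 "")) = some "det" := by
      rw [detNounRuleLoopB, dif_pos (by rw [List.length_zip]; omega),
        zip_cond sent morpList hlen 0 (by omega), if_pos himm]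
      have hkey : ((sent.zip morpList).getD 0 ("", "")).1 = sent.getD 0 "" := by
        rw [zip_getD sent morpList 0 "" "" (by omega) hlen]
      rw [hkey, ← zip_eraseIdx sent morpList 0 (by omega) (by omega)]
      apply keyB (sent.eraseIdx 0) (morpList.eraseIdx 0) _ (0-1) _
        (by rw [List.length_eraseIdx_of_lt (by omega),
            List.length_eraseIdx_of_lt (by omega)]; omega)
      refine Or.inr ⟨?_, ?_, ?_, ?_⟩
      · rw [getD_eraseIdx_of_ge _ 0 0 le_rfl]
      · intro t h1 h2
        rw [List.length_eraseIdx_of_lt (by omega)] at h2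
        rw [getD_eraseIdx_of_ge _ 0 t (by omega)]
        exact hdist 1 (by omega) (t+1) (by omega) (by omega)
      · intro u hu h2; exact absurd hu (by omega)
      · rcases DC_step0 sent morpList hdcc with hl | ⟨hl', hm'⟩
        · exact Or.inl hl
        · exact Or.inr ⟨by omega, hl', hm'⟩
    exact hnod (pvParseIdx (sent.getD 1 "")) (by rw [← hA, heqd, hB])
  · -- the pair (0,1) does not match: A never revisits word 0, B eventually removes it; key of word 0
    have hA : (detNounRuleLoopA sent lemmaList uposList xposList morpList
        (PySem.Dict.ofList ruleActions) 0).get? (pvParseIdx (sent.getD 0 "")) =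
        (PySem.Dict.ofList ruleActions).get? (pvParseIdx (sent.getD 0 "")) := by
      rw [detNounRuleLoopA, dif_pos (by omega), if_neg himm]
      exact keysA sent lemmaList uposList xposList morpList _ 1 _ le_rfl
        (fun t h1 h2 => hdist 0 (by omega) t h2 (by omega))
    have hB : (detNounRuleLoopB (sent.zip morpList)
        (PySem.Dict.ofList ruleActions) 0).get? (pvParseIdx (sent.getD 0 "")) = some "det" :=
      keyB sent morpList _ 0 _ hlen
        (Or.inr ⟨rfl, fun t h1 h2 => hdist 0 (by omega) t h2 (by omega),
          fun u hu h2 => absurd hu (by omega), Or.inl hdcc⟩)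
    exact hnod (pvParseIdx (sent.getD 0 "")) (by rw [← hA, heqd, hB])

theorem detNounRule_changed : Claim_changed_detNounRule := by
  unfold Claim_changed_detNounRule
  refine ⟨by decide, by decide, by decide, ?_, ?_, by decide⟩
  · simp [pvDiffWitness_detNounRule, pvDiffWitnessOut_detNounRule, detNounRule,
      detNounRuleLoopA, popWord, pvDN, pvParseIdx]
    decide
  · simp [pvDiffWitness_detNounRule, pvDiffWitnessOut_detNounRule, detNounRule_alt,
      detNounRuleLoopB, pvParseIdx]
    decide
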